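-- pv_equiv track=rewrite | github.com/quadrismegistus/cadence | prosodic2/constraints/constraints.py | no_window
-- ===== SOURCE A (Python) =====
-- def no_window(s,badwindow=(1,1)):
--     wlen=len(badwindow)
--     l=[]
--     window=[]
--     for x in s:
--         window.append(x)
--         l.append(int(tuple(window)==badwindow))
--         if len(window)>=wlen:window.pop(0)
--     return l
-- ===== SOURCE B (Python) =====
-- def no_window(s, badwindow=(1, 1)):
--     wlen = len(badwindow)
--     bad = list(badwindow)
--     n = len(s)
--     lead = min(n, wlen - 1) if wlen else n
--     tail = [int(s[j:j + wlen] == bad) for j in range(n - lead)]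
--     return [0] * lead + tail
-- ===== Notes on version B (the rewrite author's own statement) =====
-- stated objective: faster
-- what changed: Replaces A's per-element sliding accumulator (append, tuple(), compare, pop(0) in interpreted Python per element) with a computed run of leading zeros followed by one C-level slice comparison s[j:j+wlen]==bad per remaining position.
import Mathlib
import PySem

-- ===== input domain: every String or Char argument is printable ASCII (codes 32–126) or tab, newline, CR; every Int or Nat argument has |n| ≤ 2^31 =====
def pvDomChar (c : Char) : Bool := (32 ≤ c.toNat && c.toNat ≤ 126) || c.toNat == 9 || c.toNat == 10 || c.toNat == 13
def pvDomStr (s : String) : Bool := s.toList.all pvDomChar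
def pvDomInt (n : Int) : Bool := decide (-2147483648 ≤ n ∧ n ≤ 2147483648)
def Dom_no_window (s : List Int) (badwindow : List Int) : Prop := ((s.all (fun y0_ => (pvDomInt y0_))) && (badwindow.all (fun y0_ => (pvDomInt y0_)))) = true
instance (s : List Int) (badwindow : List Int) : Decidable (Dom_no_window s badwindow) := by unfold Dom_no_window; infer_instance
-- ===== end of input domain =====

-- B replaces A's sliding accumulator (append/compare/pop per element) by a direct
-- per-position C-level slice comparison after a computed run of leading zeros (objective: faster, measured).

-- ===== PORT A =====
-- the for-loop of A, state = (l, window), in source order: append x, append flag, pop(0) if full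
def no_window_loopA (bad : List Int) : List Int → List Int → List Int → List Int
  | [], l, _ => l
  | x :: xs, l, window =>
      let w := window ++ [x]
      let l' := l ++ [if w = bad then (1 : Int) else 0]
      let w' := if bad.length ≤ w.length then w.drop 1 else w    -- window.pop(0)
      no_window_loopA bad xs l' w'

def no_window (s : List Int) (badwindow : List Int) : List Int :=
  no_window_loopA badwindow s [] []

-- ===== PORT B =====
def no_window_alt (s : List Int) (badwindow : List Int) : List Int :=
  let wlen := badwindow.length
  let bad := badwindow                      -- list(badwindow)
  let n := s.length
  let lead := if wlen = 0 then n else min n (wlen - 1)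
  let tail := (List.range (n - lead)).map (fun (j : Nat) =>
      if PySem.List.slice s (some (j : Int)) (some ((j : Int) + (wlen : Int))) = bad
      then (1 : Int) else 0)                -- int(s[j:j+wlen] == bad)
  List.replicate lead 0 ++ tail

-- ===== PRECONDITION & SPEC =====
def Spec_no_window (s : List Int) (badwindow : List Int) (out : List Int) : Prop := out = no_window_alt s badwindow
instance (s : List Int) (badwindow : List Int) (out : List Int) : Decidable (Spec_no_window s badwindow out) := by unfold Spec_no_window; infer_instance

-- ===== CLAIM (what is proved, stated in full; the proofs are below) =====
def Claim_equal_no_window : Prop := ∀ (s : List Int) (badwindow : List Int), Dom_no_window s badwindow → Spec_no_window s badwindow (no_window s badwindow)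

-- ===== LEMMAS AND PROOFS =====

/-- last `n` elements of `l` (all of `l` if shorter) -/
def pvTl (n : Nat) (l : List Int) : List Int := l.drop (l.length - n)

/-- the flag A emits at a position whose processed prefix (with carried window) is `u` -/
def pvFlag (bad u : List Int) : Int := if pvTl bad.length u = bad then 1 else 0

theorem pvTl_of_le {n : Nat} {l : List Int} (h : l.length ≤ n) : pvTl n l = l := by
  unfold pvTl; rw [Nat.sub_eq_zero_of_le h]; simp

theorem pvTl_tl_append (n m : Nat) (u t : List Int) (h : n ≤ m + t.length) :
    pvTl n (pvTl m u ++ t) = pvTl n (u ++ t) := by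
  by_cases hm : u.length ≤ m
  · rw [pvTl_of_le hm]
  · unfold pvTl
    have hd : u.length - m ≤ u.length := Nat.sub_le _ _
    rw [← List.drop_append_of_le_length hd, List.drop_drop]
    congr 1
    simp [List.length_drop]
    omega

theorem loopA_empty (xs l w : List Int) :
    no_window_loopA [] xs l w = l ++ List.replicate xs.length 0 := by
  induction xs generalizing l w with
  | nil => simp [no_window_loopA]
  | cons x xs ih =>
      rw [no_window_loopA]
      simp only [List.length_nil]
      rw [ih]
      have : (w ++ [x] = ([] : List Int)) = False := by simp
      simp [this, List.replicate_succ]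

theorem loopA_char (bad : List Int) (hb : bad ≠ []) :
    ∀ (xs l w : List Int), w.length + 1 ≤ bad.length →
      no_window_loopA bad xs l w =
        l ++ (List.range xs.length).map (fun j => pvFlag bad (w ++ xs.take (j + 1))) := by
  intro xs
  induction xs with
  | nil => intro l w _; simp [no_window_loopA]
  | cons x xs ih =>
      intro l w hw
      have hblen : 1 ≤ bad.length := by
        cases bad with | nil => exact absurd rfl hb | cons a t => simp
      rw [no_window_loopA]
      have hflag : (if w ++ [x] = bad then (1 : Int) else 0) = pvFlag bad (w ++ [x]) := by
        unfold pvFlag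
        rw [pvTl_of_le (by simpa using hw)]
      set w' := if bad.length ≤ (w ++ [x]).length then (w ++ [x]).drop 1 else w ++ [x] with hw'
      have hw'eq : w' = pvTl (bad.length - 1) (w ++ [x]) := by
        rw [hw']
        split
        next h =>
          unfold pvTl
          congr 1
          simp at h ⊢
          omega
        next h =>
          have hle : (w ++ [x]).length ≤ bad.length - 1 := by simp at h ⊢; omega
          rw [pvTl_of_le hle]
      have hw'len : w'.length + 1 ≤ bad.length := by
        rw [hw'eq]
        unfold pvTl
        simp [List.length_drop]
        omega
      rw [ih _ _ hw'len]
      rw [List.append_assoc]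
      congr 1
      rw [List.length_cons, List.range_succ_eq_map, List.map_cons, List.map_map]
      simp only [List.take_succ_cons, List.take_zero]
      rw [hflag, List.singleton_append]
      congr 1
      · apply List.map_congr_left
        intro j hj
        simp only [Function.comp, Nat.succ_eq_add_one]
        have hjlt : j < xs.length := by simpa using hj
        have ht : (xs.take (j + 1)).length = j + 1 := by
          rw [List.length_take]; omega
        unfold pvFlag
        rw [hw'eq, pvTl_tl_append _ _ _ _ (by omega)]
        rw [List.append_assoc]
        simp

theorem no_window_char (s bad : List Int) (hb : bad ≠ []) :
    no_window s bad = (List.range s.length).map (fun j => pvFlag bad (s.take (j + 1))) := by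
  unfold no_window
  rw [loopA_char bad hb s [] [] (by simp; cases bad with | nil => exact absurd rfl hb | cons a t => simp)]
  simp

theorem alt_char (s bad : List Int) (hb : bad ≠ []) :
    no_window_alt s bad = (List.range s.length).map (fun j => pvFlag bad (s.take (j + 1))) := by
  have hblen : 1 ≤ bad.length := by
    cases bad with | nil => exact absurd rfl hb | cons a t => simp
  unfold no_window_alt
  simp only []
  have hb0 : (bad.length = 0) = False := by simp; omega
  rw [if_neg (by omega)]
  set n := s.length with hn
  set lead := min n (bad.length - 1) with hlead
  have hlead_le : lead ≤ n := by omega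
  have hsplit : n = lead + (n - lead) := by omega
  conv_rhs => rw [hsplit, List.range_add, List.map_append, List.map_map]
  congr 1
  · -- leading zeros
    symm
    rw [List.eq_replicate_iff]
    refine ⟨by simp, ?_⟩
    intro b hbmem
    simp only [List.mem_map, List.mem_range] at hbmem
    obtain ⟨j, hj, hbeq⟩ := hbmem
    subst hbeq
    unfold pvFlag
    have hlen : (s.take (j + 1)).length = j + 1 := by
      rw [List.length_take]; omega
    rw [pvTl_of_le (by omega)]
    rw [if_neg]
    intro hcon
    have := congrArg List.length hcon
    rw [hlen] at this
    omega
  · -- the slice part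
    apply List.map_congr_left
    intro j hj
    simp only [Function.comp, List.mem_range] at *
    -- here lead = bad.length - 1 since n - lead > 0 forces lead < n
    have hleadv : lead = bad.length - 1 := by omega
    rw [PySem.List.slice_natCast_add]
    unfold pvFlag
    have hidx : lead + j < n := by omega
    have hlen : (s.take (lead + j + 1)).length = lead + j + 1 := by
      rw [List.length_take]; omega
    unfold pvTl
    rw [hlen]
    have h1 : lead + j + 1 - bad.length = j := by omega
    rw [h1]
    have h2 : lead + j + 1 = j + bad.length := by omega
    rw [h2]
    rw [List.drop_take]
    have h3 : j + bad.length - j = bad.length := by omega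
    rw [h3]

-- ===== VERDICT (by name: the statement is the Claim_ definition above) =====
theorem no_window_spec : Claim_equal_no_window := by
  intro s bad _
  unfold Spec_no_window
  rcases eq_or_ne bad ([] : List Int) with hb | hb
  · subst hb
    unfold no_window no_window_alt
    rw [loopA_empty]
    simp
  · rw [no_window_char s bad hb, alt_char s bad hb]
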